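-- pv_equiv track=rewrite | github.com/viral-k/leetcode-problems | medium/3741-minimum-distance-between-three-equal-elements-ii/solution.py | minimumDistance
-- ===== SOURCE A (Python) =====
-- from typing import List
-- from collections import defaultdict
--
-- def minimumDistance(nums: List[int]) -> int:
--     """
--     3741. Minimum Distance Between Three Equal Elements II
--     Time: O(n)
--     Space: O(n)
--     """
--     indices = defaultdict(list)
--
--     for i, num in enumerate(nums):
--         indices[num].append(i)
--
--     min_dist = float('inf')
--
--     for idx_list in indices.values():
--         if len(idx_list) >= 3:
--             for i in range(len(idx_list) - 2):
--                 span = idx_list[i + 2] - idx_list[i]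
--                 min_dist = min(min_dist, 2 * span)
--
--     return min_dist if min_dist != float('inf') else -1
-- ===== SOURCE B (Python) =====
-- from typing import List
--
-- def minimumDistance(nums: List[int]) -> int:
--     """Single fused pass: keep only each value's last two indices; no grouping pass."""
--     last2 = {}
--     best = None
--     for i, num in enumerate(nums):
--         prev = last2.get(num, [])
--         if len(prev) == 2:
--             d = 2 * (i - prev[0])
--             if best is None or d < best:
--                 best = d
--         last2[num] = (prev + [i])[-2:]
--     return -1 if best is None else best
-- ===== Notes on version B (the rewrite author's own statement) =====
-- stated objective: alternative
-- what changed: A builds a dict of all occurrence indices per value and then scans every group's length-3 windows in a second pass; B is a single fused pass that keeps only each value's last two indices and updates the running minimum 2*(i - older) on the fly, so no per-value index lists and no second pass exist.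
import Mathlib
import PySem

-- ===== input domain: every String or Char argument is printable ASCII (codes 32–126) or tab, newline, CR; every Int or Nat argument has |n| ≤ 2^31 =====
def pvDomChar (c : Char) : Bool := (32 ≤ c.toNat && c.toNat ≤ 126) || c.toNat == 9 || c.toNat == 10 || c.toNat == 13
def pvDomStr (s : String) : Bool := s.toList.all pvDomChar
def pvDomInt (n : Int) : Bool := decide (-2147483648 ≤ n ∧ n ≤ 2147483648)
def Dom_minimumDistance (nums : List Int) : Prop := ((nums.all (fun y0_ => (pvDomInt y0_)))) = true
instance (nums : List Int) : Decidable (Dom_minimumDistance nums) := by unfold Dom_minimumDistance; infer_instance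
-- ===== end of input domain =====

-- B replaces A's group-then-scan (index lists per value, then windows of 3) by one fused pass
-- keeping only each value's last two indices; same O(n) cost, different maintained state (objective: alternative).

-- ===== PORT A =====
-- min(min_dist, v) with min_dist starting at float('inf'): Option Int, none = inf
def pvMin (acc : Option Int) (v : Int) : Option Int :=
  match acc with
  | none => some v
  | some b => some (min b v)

def minimumDistance (nums : List Int) : Int :=
  let indices : PySem.Dict Int (List Int) :=
    (PySem.List.enumerate nums).foldl
      (fun d q => d.insert q.2 (d.getD q.2 [] ++ [q.1])) PySem.Dict.empty
  let min_dist : Option Int :=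
    indices.values.foldl
      (fun acc idx_list =>
        if 3 ≤ idx_list.length then
          (PySem.List.pyRange 0 ((idx_list.length : Int) - 2) 1).foldl
            (fun acc i =>
              -- i and i+2 are valid indices of idx_list here, so pyGetD is exact
              pvMin acc (2 * (PySem.List.pyGetD idx_list (i + 2) 0 -
                              PySem.List.pyGetD idx_list i 0))) acc
        else acc) none
  match min_dist with
  | none => -1
  | some m => m

-- ===== PORT B =====
def minimumDistance_alt (nums : List Int) : Int :=
  let st :=
    (PySem.List.enumerate nums).foldl
      (fun (st : Option Int × PySem.Dict Int (List Int)) q =>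
        let prev := st.2.getD q.2 []
        let best :=
          if prev.length = 2 then
            -- prev has length 2, so prev[0] is in range: pyGetD is exact
            let d := 2 * (q.1 - PySem.List.pyGetD prev 0 0)
            match st.1 with
            | none => some d
            | some b => if d < b then some d else some b
          else st.1
        (best, st.2.insert q.2 (PySem.List.slice (prev ++ [q.1]) (some (-2)) none)))
      (none, PySem.Dict.empty)
  match st.1 with
  | none => -1
  | some b => b

-- ===== PRECONDITION & SPEC =====
def Spec_minimumDistance (nums : List Int) (out : Int) : Prop := out = minimumDistance_alt nums
instance (nums : List Int) (out : Int) : Decidable (Spec_minimumDistance nums out) := by unfold Spec_minimumDistance; infer_instance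

-- ===== CLAIM (what is proved, stated in full; the proofs are below) =====
def Claim_equal_minimumDistance : Prop := ∀ (nums : List Int), Dom_minimumDistance nums → Spec_minimumDistance nums (minimumDistance nums)

-- ===== LEMMAS AND PROOFS =====

-- occurrence indices of value v in p (as Python ints)
def pvOcc (p : List Int) (v : Int) : List Int :=
  (PySem.List.enumerate p).filterMap (fun q => if q.2 = v then some q.1 else none)

-- distinct values of p in first-occurrence order (= A's dict key order)
def pvVals (p : List Int) : List Int := PySem.List.dedup p

-- the window candidates 2*(l[k+2]-l[k]) of one index list
def pvS (l : List Int) : List Int :=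
  (List.range (l.length - 2)).map (fun k => 2 * (l.getD (k + 2) 0 - l.getD k 0))

-- all candidates, grouped by value in A's order
def pvCL (p : List Int) : List Int := (pvVals p).flatMap (fun v => pvS (pvOcc p v))

def pvM (p : List Int) : Option Int := (pvCL p).foldl pvMin none

def pvLast2 (l : List Int) : List Int := l.drop (l.length - 2)

-- the candidate contributed by appending one more x (nonempty iff x already occurred twice)
def pvDelta (p : List Int) (x : Int) : List Int :=
  if 2 ≤ (pvOcc p x).length then
    [2 * ((p.length : Int) - (pvOcc p x).getD ((pvOcc p x).length - 2) 0)]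
  else []

theorem pvMin_rc (a : Option Int) (x y : Int) : pvMin (pvMin a x) y = pvMin (pvMin a y) x := by
  cases a <;> simp [pvMin, min_comm, min_left_comm]

theorem foldl_pvMin_perm {l l' : List Int} (hp : l.Perm l') (a : Option Int) :
    l.foldl pvMin a = l'.foldl pvMin a :=
  @List.Perm.foldl_eq _ _ pvMin _ _ ⟨pvMin_rc⟩ hp a

theorem pvOcc_append (p : List Int) (x v : Int) :
    pvOcc (p ++ [x]) v = pvOcc p v ++ (if x = v then [(p.length : Int)] else []) := by
  by_cases hxv : x = v <;>
    simp [pvOcc, PySem.List.enumerate_append, List.filterMap_append,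
      PySem.List.enumerate_cons, PySem.List.enumerate_nil, hxv]

theorem pvOcc_nil_of_not_mem {p : List Int} {x : Int} (h : x ∉ p) : pvOcc p x = [] := by
  rw [pvOcc, List.filterMap_eq_nil_iff]
  intro q hq
  rcases (PySem.List.mem_enumerate_iff _ _ _).1 hq with ⟨k, hk, rfl⟩
  simp only [ite_eq_right_iff, reduceCtorEq, imp_false]
  intro hv
  exact h (hv ▸ List.getElem_mem hk)

theorem pvS_append (l : List Int) (i : Int) :
    pvS (l ++ [i]) = pvS l ++ (if 2 ≤ l.length then [2 * (i - l.getD (l.length - 2) 0)] else []) := by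
  by_cases h : 2 ≤ l.length
  · rw [if_pos h]
    simp only [pvS, List.length_append, List.length_cons, List.length_nil]
    have h1 : l.length + 1 - 2 = (l.length - 2) + 1 := by omega
    rw [h1, List.range_succ, List.map_append]
    congr 1
    · apply List.map_congr_left
      intro k hk
      have hk' : k < l.length - 2 := List.mem_range.1 hk
      rw [List.getD_append l [i] 0 (k + 2) (by omega), List.getD_append l [i] 0 k (by omega)]
    · have h2 : l.length - 2 + 2 = l.length := by omega
      have e1 : (l ++ [i]).getD (l.length - 2 + 2) 0 = i := by
        rw [h2, List.getD_eq_getElem?_getD, List.getElem?_append_right (le_refl _)]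
        simp
      have e2 : (l ++ [i]).getD (l.length - 2) 0 = l.getD (l.length - 2) 0 :=
        List.getD_append l [i] 0 (l.length - 2) (by omega)
      rw [List.map_cons, List.map_nil, e1, e2]
  · rw [if_neg h]
    have h1 : l.length + 1 - 2 = 0 := by omega
    have h2 : l.length - 2 = 0 := by omega
    simp [pvS, h1, h2]

theorem pvVals_append (p : List Int) (x : Int) :
    pvVals (p ++ [x]) = if x ∈ p then pvVals p else pvVals p ++ [x] := by
  simp [pvVals, PySem.Set.ofList_append_singleton, PySem.Set.add_eq_ite, PySem.Set.mem_ofList]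

theorem flatMap_pointwise_update {L : List Int} {f f' : Int → List Int} {x : Int} {δ : List Int}
    (hnd : L.Nodup) (hx : x ∈ L) (hagree : ∀ v ∈ L, v ≠ x → f' v = f v)
    (hchg : f' x = f x ++ δ) : (L.flatMap f').Perm (L.flatMap f ++ δ) := by
  induction L with
  | nil => cases hx
  | cons a t ih =>
    rw [List.flatMap_cons, List.flatMap_cons]
    rcases List.mem_cons.1 hx with rfl | hxt
    · have ht : List.flatMap f' t = List.flatMap f t := by
        apply List.flatMap_congr
        intro v hv
        exact hagree v (List.mem_cons_of_mem _ hv) (fun h => (List.nodup_cons.1 hnd).1 (h ▸ hv))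
      rw [ht, hchg]
      simp only [List.append_assoc]
      exact List.Perm.append_left _ List.perm_append_comm
    · have ha : a ≠ x := fun h => (List.nodup_cons.1 hnd).1 (h ▸ hxt)
      rw [hagree a (List.mem_cons_self) ha]
      simp only [List.append_assoc]
      exact List.Perm.append_left _
        (ih (List.nodup_cons.1 hnd).2 hxt (fun v hv hvx => hagree v (List.mem_cons_of_mem _ hv) hvx))

theorem pvCL_append (p : List Int) (x : Int) :
    (pvCL (p ++ [x])).Perm (pvCL p ++ pvDelta p x) := by
  by_cases hx : x ∈ p
  · simp only [pvCL]
    rw [pvVals_append, if_pos hx]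
    exact flatMap_pointwise_update (L := pvVals p)
      (f := fun v => pvS (pvOcc p v)) (f' := fun v => pvS (pvOcc (p ++ [x]) v))
      (x := x) (δ := pvDelta p x) (PySem.List.nodup_dedup p)
      ((PySem.List.mem_dedup p x).2 hx)
      (fun v _ hvx => by
        show pvS (pvOcc (p ++ [x]) v) = pvS (pvOcc p v)
        rw [pvOcc_append, if_neg (fun h => hvx h.symm), List.append_nil])
      (by
        show pvS (pvOcc (p ++ [x]) x) = pvS (pvOcc p x) ++ pvDelta p x
        rw [pvOcc_append, if_pos rfl, pvS_append, pvDelta])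
  · have hocc : pvOcc p x = [] := pvOcc_nil_of_not_mem hx
    have hδ : pvDelta p x = [] := by rw [pvDelta, hocc]; simp
    rw [pvCL, pvVals_append, if_neg hx, List.flatMap_append, hδ, List.append_nil]
    have h1 : List.flatMap (fun v => pvS (pvOcc (p ++ [x]) v)) (pvVals p)
        = List.flatMap (fun v => pvS (pvOcc p v)) (pvVals p) := by
      apply List.flatMap_congr
      intro v hv
      have hvx : x ≠ v := fun h => hx (h ▸ (PySem.List.mem_dedup p v).1 hv)
      rw [pvOcc_append, if_neg hvx, List.append_nil]
    have h2 : List.flatMap (fun v => pvS (pvOcc (p ++ [x]) v)) [x] = [] := by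
      rw [List.flatMap_cons, List.flatMap_nil, pvOcc_append, if_pos rfl, hocc, List.append_nil,
        List.nil_append]
      simp [pvS]
    rw [h1, h2, List.append_nil, pvCL]

theorem pvM_append (p : List Int) (x : Int) :
    pvM (p ++ [x]) = (pvDelta p x).foldl pvMin (pvM p) := by
  have h := foldl_pvMin_perm (pvCL_append p x) none
  simpa [pvM, List.foldl_append] using h

theorem pvLast2_length (l : List Int) : (pvLast2 l).length = min 2 l.length := by
  simp [pvLast2]; omega

theorem pvLast2_idem_append (l : List Int) (i : Int) :
    pvLast2 (pvLast2 l ++ [i]) = pvLast2 (l ++ [i]) := by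
  by_cases h : 2 ≤ l.length
  · simp only [pvLast2, List.length_append, List.length_cons, List.length_nil, List.length_drop]
    have h2 : l.length - (l.length - 2) + 1 - 2 = 1 := by omega
    have h3 : l.length + 1 - 2 = l.length - 1 := by omega
    rw [h2, h3, List.drop_append, List.drop_append, List.drop_drop]
    simp only [List.length_drop]
    have h4 : l.length - 2 + 1 = l.length - 1 := by omega
    have h5 : 1 - (l.length - (l.length - 2)) = 0 := by omega
    have h6 : l.length - 1 - l.length = 0 := by omega
    rw [h4, h5, h6]
  · have h1 : l.length - 2 = 0 := by omega
    have h2 : pvLast2 l = l := by rw [pvLast2, h1, List.drop_zero]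
    rw [h2]

theorem pvLast2_getD_zero (l : List Int) (_h : 2 ≤ l.length) :
    (pvLast2 l).getD 0 0 = l.getD (l.length - 2) 0 := by
  simp only [pvLast2, List.getD_eq_getElem?_getD, List.getElem?_drop, Nat.add_zero]

-- ===== A side =====

def pvDA (p : List Int) : PySem.Dict Int (List Int) :=
  (PySem.List.enumerate p).foldl
    (fun (d : PySem.Dict Int (List Int)) q => d.insert q.2 (d.getD q.2 [] ++ [q.1]))
    PySem.Dict.empty

theorem get?_mk_map (L : List Int) (g : Int → List Int) (x : Int) :
    (PySem.Dict.mk (L.map (fun v => (v, g v)))).get? x = if x ∈ L then some (g x) else none := by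
  induction L with
  | nil => rfl
  | cons a t ih =>
    rw [List.map_cons, PySem.Dict.get?_mk_cons, ih]
    by_cases hax : a = x
    · subst hax; simp
    · have hxa : ¬ x = a := fun h => hax h.symm
      simp [hax, hxa]

theorem dictA_items (p : List Int) :
    (pvDA p).items = (pvVals p).map (fun v => (v, pvOcc p v)) := by
  induction p using List.reverseRecOn with
  | nil => rfl
  | append_singleton p x ih =>
    have hstep : pvDA (p ++ [x]) = (pvDA p).insert x ((pvDA p).getD x [] ++ [(p.length : Int)]) := by
      rw [pvDA, PySem.List.enumerate_append, List.foldl_append, PySem.List.enumerate_cons,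
        PySem.List.enumerate_nil]
      simp [pvDA]
    have hmk : pvDA p = PySem.Dict.mk ((pvVals p).map (fun v => (v, pvOcc p v))) :=
      PySem.Dict.ext ih
    have hgetD : (pvDA p).getD x [] = pvOcc p x := by
      show ((pvDA p).get? x).getD [] = pvOcc p x
      rw [hmk, get?_mk_map]
      by_cases hx : x ∈ p
      · rw [if_pos (show x ∈ pvVals p from (PySem.List.mem_dedup p x).2 hx)]; rfl
      · rw [if_neg (show ¬ x ∈ pvVals p from fun h => hx ((PySem.List.mem_dedup p x).1 h)),
          pvOcc_nil_of_not_mem hx]; rfl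
    have hkeys : (pvDA p).keys = pvVals p := by
      show (pvDA p).items.map (·.1) = pvVals p
      rw [ih, List.map_map]
      exact List.map_id _
    have hmem : x ∈ (pvDA p).keys ↔ x ∈ p := by
      rw [hkeys]
      exact PySem.List.mem_dedup p x
    by_cases hx : x ∈ p
    · have hc : (pvDA p).contains x = true :=
        (PySem.Dict.contains_iff_mem_keys _ _).2 (hmem.2 hx)
      rw [hstep, PySem.Dict.items_insert_of_contains _ _ hc, ih, List.map_map,
        pvVals_append, if_pos hx]
      apply List.map_congr_left
      intro v hv
      by_cases hvx : v = x
      · subst hvx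
        simp [hgetD, pvOcc_append]
      · have : x ≠ v := fun h => hvx h.symm
        simp [hvx, pvOcc_append, this]
    · have hc : (pvDA p).contains x = false := by
        rw [← Bool.not_eq_true]
        intro hcc
        exact hx (hmem.1 ((PySem.Dict.contains_iff_mem_keys _ _).1 hcc))
      rw [hstep, PySem.Dict.items_insert_of_not_contains _ _ hc, ih, pvVals_append, if_neg hx,
        List.map_append]
      congr 1
      · apply List.map_congr_left
        intro v hv
        have hvx : x ≠ v := fun h => hx (h ▸ (PySem.List.mem_dedup p v).1 hv)
        rw [pvOcc_append, if_neg hvx, List.append_nil]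
      · rw [hgetD, pvOcc_nil_of_not_mem hx]
        simp [pvOcc_append, pvOcc_nil_of_not_mem hx]

theorem innerA (l : List Int) (acc : Option Int) :
    (if 3 ≤ l.length then
      (PySem.List.pyRange 0 ((l.length : Int) - 2) 1).foldl
        (fun acc i => pvMin acc (2 * (PySem.List.pyGetD l (i + 2) 0 - PySem.List.pyGetD l i 0))) acc
     else acc) = (pvS l).foldl pvMin acc := by
  by_cases h : 3 ≤ l.length
  · rw [if_pos h, PySem.List.pyRange_one]
    have ht : ((l.length : Int) - 2 - 0).toNat = l.length - 2 := by omega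
    rw [ht, List.foldl_map, pvS, List.foldl_map]
    apply PySem.List.foldl_congr_mem
    intro a k hk
    have hc : (0 : Int) + (k : Int) + 2 = ((k + 2 : Nat) : Int) := by push_cast; ring
    have hc0 : (0 : Int) + (k : Int) = ((k : Nat) : Int) := by ring
    rw [hc, hc0, PySem.List.pyGetD_natCast, PySem.List.pyGetD_natCast]
  · rw [if_neg h]
    have h2 : l.length - 2 = 0 := by omega
    simp [pvS, h2]

theorem A_eq (nums : List Int) :
    minimumDistance nums = (match pvM nums with | none => -1 | some m => m) := by
  have hv : (pvDA nums).values = (pvVals nums).map (fun v => pvOcc nums v) := by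
    show (pvDA nums).items.map (·.2) = _
    rw [dictA_items, List.map_map]
    rfl
  have hfun : (fun (acc : Option Int) (idx_list : List Int) =>
      if 3 ≤ idx_list.length then
        (PySem.List.pyRange 0 ((idx_list.length : Int) - 2) 1).foldl
          (fun acc i => pvMin acc (2 * (PySem.List.pyGetD idx_list (i + 2) 0 -
            PySem.List.pyGetD idx_list i 0))) acc
      else acc) = fun acc l => (pvS l).foldl pvMin acc :=
    funext fun acc => funext fun l => innerA l acc
  show (match ((pvDA nums).values.foldl _ none : Option Int) with
    | none => (-1 : Int) | some m => m) = _
  rw [hfun, hv, List.foldl_map, ← List.foldl_map (f := fun v => pvS (pvOcc nums v))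
      (g := fun (acc : Option Int) sl => sl.foldl pvMin acc),
    ← List.foldl_flatten, ← List.flatMap_def]
  rfl

-- ===== B side =====

def pvStepB (st : Option Int × PySem.Dict Int (List Int)) (q : Int × Int) :
    Option Int × PySem.Dict Int (List Int) :=
  let prev := st.2.getD q.2 []
  let best :=
    if prev.length = 2 then
      let d := 2 * (q.1 - PySem.List.pyGetD prev 0 0)
      match st.1 with
      | none => some d
      | some b => if d < b then some d else some b
    else st.1
  (best, st.2.insert q.2 (PySem.List.slice (prev ++ [q.1]) (some (-2)) none))

theorem B_state (p : List Int) :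
    ((PySem.List.enumerate p).foldl pvStepB (none, PySem.Dict.empty)).1 = pvM p ∧
    ∀ v, ((PySem.List.enumerate p).foldl pvStepB (none, PySem.Dict.empty)).2.getD v []
      = pvLast2 (pvOcc p v) := by
  induction p using List.reverseRecOn with
  | nil =>
    constructor
    · simp [pvM, pvCL, pvVals, pvOcc, PySem.List.enumerate_nil, PySem.List.dedup]
    · intro v
      simp [pvOcc, pvLast2, PySem.List.enumerate_nil]
  | append_singleton p x ih =>
    obtain ⟨ih1, ih2⟩ := ih
    rw [PySem.List.enumerate_append, List.foldl_append, PySem.List.enumerate_cons,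
      PySem.List.enumerate_nil, List.foldl_cons, List.foldl_nil]
    simp only [pvStepB, zero_add, ih2 x]
    constructor
    · rw [pvM_append, ih1]
      by_cases hc : 2 ≤ (pvOcc p x).length
      · have hl2 : (pvLast2 (pvOcc p x)).length = 2 := by rw [pvLast2_length]; omega
        rw [if_pos hl2, pvDelta, if_pos hc, List.foldl_cons, List.foldl_nil,
          PySem.List.pyGetD_zero, pvLast2_getD_zero _ hc]
        cases pvM p with
        | none => rfl
        | some b =>
          show (if _ < b then _ else _) = pvMin (some b) _
          rw [pvMin]
          split_ifs with hlt
          · rw [min_eq_right (le_of_lt hlt)]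
          · rw [min_eq_left (not_lt.1 hlt)]
      · have hl2 : (pvLast2 (pvOcc p x)).length ≠ 2 := by rw [pvLast2_length]; omega
        rw [if_neg hl2, pvDelta, if_neg hc, List.foldl_nil]
    · intro v
      by_cases hvx : v = x
      · subst hvx
        rw [PySem.Dict.getD_insert_self, PySem.List.slice_from_neg_ofNat _ 2 (by omega)]
        show pvLast2 (pvLast2 (pvOcc p v) ++ [(p.length : Int)]) = _
        rw [pvLast2_idem_append, pvOcc_append, if_pos rfl]
      · rw [PySem.Dict.getD_insert_of_ne _ _ _ hvx, ih2, pvOcc_append,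
          if_neg (fun h => hvx h.symm), List.append_nil]

theorem B_eq (nums : List Int) :
    minimumDistance_alt nums = (match pvM nums with | none => -1 | some m => m) := by
  show (match ((PySem.List.enumerate nums).foldl pvStepB (none, PySem.Dict.empty)).1 with
    | none => (-1 : Int) | some b => b) = _
  rw [(B_state nums).1]

-- ===== VERDICT (by name: the statement is the Claim_ definition above) =====
theorem minimumDistance_spec : Claim_equal_minimumDistance := by
  intro nums _
  unfold Spec_minimumDistance
  rw [A_eq, B_eq]
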